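-- pv_equiv track=rewrite | github.com/YuraEvstratov/Home-works | Algorithms/polindrome.py | its_palindrome
-- ===== SOURCE A (Python) =====
-- def its_palindrome(x: int) -> bool:
--     if x < 0 or x % 10 == 0 and x != 0:
--         return False
--     copy = x
--     new_value = 0
--     while x != 0:
--         new_value = new_value * 10 + x % 10
--         x = x // 10
--     return new_value == copy
-- ===== SOURCE B (Python) =====
-- def its_palindrome(x: int) -> bool:
--     s = str(x)
--     return s == s[::-1]
-- ===== Notes on version B (the rewrite author's own statement) =====
-- stated objective: idiomatic
-- what changed: B replaces A's arithmetic digit-reversal loop (with its explicit sign/trailing-zero guard) by converting x to its decimal string and testing s == s[::-1]; the guard cases are subsumed by the string comparison.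
import Mathlib
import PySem

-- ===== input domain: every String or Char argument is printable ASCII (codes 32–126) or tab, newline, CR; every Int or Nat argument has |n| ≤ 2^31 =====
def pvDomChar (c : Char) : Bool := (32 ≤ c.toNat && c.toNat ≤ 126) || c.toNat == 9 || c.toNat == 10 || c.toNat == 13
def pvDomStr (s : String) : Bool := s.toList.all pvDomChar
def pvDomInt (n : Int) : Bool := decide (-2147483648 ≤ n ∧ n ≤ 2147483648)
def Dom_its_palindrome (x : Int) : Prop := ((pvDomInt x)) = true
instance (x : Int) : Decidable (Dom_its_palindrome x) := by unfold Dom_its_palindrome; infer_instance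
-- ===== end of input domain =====

-- B is the idiomatic string check s == s[::-1]; A's arithmetic digit-reversal loop is proved equal to it on all ints.

-- ===== PORT A =====
-- the while loop 'while x != 0: new_value = new_value*10 + x%10; x = x//10'.
-- Python only reaches the loop with x ≥ 0 (the guard returns early on x < 0), so the
-- recursion is guarded by 0 < x purely for termination; for x ≥ 0 it is exactly 'x != 0'.
def pvRevLoop (x new_value : Int) : Int :=
  if h : 0 < x then
    pvRevLoop (PySem.Int.floordiv x 10) (new_value * 10 + PySem.Int.mod x 10)
  else new_value
termination_by x.toNat
decreasing_by
  simp only [PySem.Int.floordiv]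
  rw [Int.fdiv_eq_ediv]
  omega

def its_palindrome (x : Int) : Bool :=
  if x < 0 || (PySem.Int.mod x 10 == 0 && x != 0) then false
  else
    -- copy = x; the loop; return new_value == copy
    pvRevLoop x 0 == x

-- ===== PORT B =====
-- s = str(x); return s == s[::-1]   (s[::-1] is the reverse of the character list:
-- PySem.Str.slice?_none_none_neg_one; string equality is equality of the char lists)
def its_palindrome_alt (x : Int) : Bool :=
  let s := PySem.Int.toChars x
  s == s.reverse

-- ===== PRECONDITION & SPEC =====
def Spec_its_palindrome (x : Int) (out : Bool) : Prop := out = its_palindrome_alt x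
instance (x : Int) (out : Bool) : Decidable (Spec_its_palindrome x out) := by unfold Spec_its_palindrome; infer_instance

-- ===== CLAIM (what is proved, stated in full; the proofs are below) =====
def Claim_equal_its_palindrome : Prop := ∀ (x : Int), Dom_its_palindrome x → Spec_its_palindrome x (its_palindrome x)

-- ===== LEMMAS AND PROOFS =====

-- Nat.digitChar is injective on decimal digits, and never '-'
lemma pv_digitChar_inj {a b : Nat} (ha : a < 10) (hb : b < 10)
    (h : Nat.digitChar a = Nat.digitChar b) : a = b := by
  interval_cases a <;> interval_cases b <;> simp_all [Nat.digitChar]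

lemma pv_digitChar_ne_dash {a : Nat} (ha : a < 10) : Nat.digitChar a ≠ '-' := by
  interval_cases a <;> simp [Nat.digitChar]

lemma pv_map_digitChar_inj : ∀ (l₁ l₂ : List Nat), (∀ d ∈ l₁, d < 10) → (∀ d ∈ l₂, d < 10) →
    l₁.map Nat.digitChar = l₂.map Nat.digitChar → l₁ = l₂ := by
  intro l₁
  induction l₁ with
  | nil => intro l₂ _ _ h; cases l₂ <;> simp_all
  | cons a t ih =>
    intro l₂ h1 h2 h
    cases l₂ with
    | nil => simp_all
    | cons b t' =>
      simp only [List.map_cons, List.cons.injEq] at h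
      have := pv_digitChar_inj (h1 a (by simp)) (h2 b (by simp)) h.1
      have := ih t' (fun d hd => h1 d (by simp [hd])) (fun d hd => h2 d (by simp [hd])) h.2
      simp_all

-- Nat.toDigitsCore characterised by Nat.digits
lemma pv_toDigitsCore_eq : ∀ (f n : Nat) (acc : List Char), 0 < n → n < f →
    Nat.toDigitsCore 10 f n acc = ((Nat.digits 10 n).map Nat.digitChar).reverse ++ acc := by
  intro f
  induction f with
  | zero => intro n acc h1 h2; omega
  | succ f ih =>
    intro n acc h1 h2
    rw [Nat.toDigitsCore]
    have hd : Nat.digits 10 n = n % 10 :: Nat.digits 10 (n / 10) := Nat.digits_def' (by norm_num) h1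
    by_cases h : n / 10 = 0
    · simp [h, hd]
    · have hlt : n / 10 < f := by omega
      simp only [h, if_false]
      rw [ih (n / 10) _ (Nat.pos_of_ne_zero h) hlt, hd]
      simp

lemma pv_toDigits_eq {n : Nat} (h : 0 < n) :
    Nat.toDigits 10 n = ((Nat.digits 10 n).map Nat.digitChar).reverse := by
  rw [Nat.toDigits, pv_toDigitsCore_eq (n + 1) n [] h (by omega), List.append_nil]

lemma pv_mod_cast (n : Nat) : PySem.Int.mod (n : Int) 10 = ((n % 10 : Nat) : Int) := by
  simp only [PySem.Int.mod, Int.fmod_eq_emod]; omega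

lemma pv_floordiv_cast (n : Nat) : PySem.Int.floordiv (n : Int) 10 = ((n / 10 : Nat) : Int) := by
  simp only [PySem.Int.floordiv]
  rw [Int.fdiv_eq_ediv]
  omega

-- A's loop computes the base-10 digit reversal
lemma pv_revLoop_eq : ∀ (n : Nat) (acc : Int),
    pvRevLoop (n : Int) acc
      = acc * 10 ^ (Nat.digits 10 n).length + (Nat.ofDigits 10 (Nat.digits 10 n).reverse : Nat) := by
  intro n
  induction n using Nat.strong_induction_on with
  | _ n ih =>
    intro acc
    rw [pvRevLoop.eq_def]
    by_cases h : 0 < n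
    · have hpos : (0 : Int) < (n : Int) := by exact_mod_cast h
      rw [dif_pos hpos, pv_floordiv_cast, pv_mod_cast, ih (n / 10) (Nat.div_lt_self h (by norm_num))]
      have hd : Nat.digits 10 n = n % 10 :: Nat.digits 10 (n / 10) := Nat.digits_def' (by norm_num) h
      rw [hd]
      simp only [List.reverse_cons, List.length_cons, Nat.ofDigits_append, Nat.ofDigits_cons,
        Nat.ofDigits_nil, List.length_reverse]
      push_cast
      ring
    · have h0 : n = 0 := by omega
      have hnp : ¬ (0 : Int) < (n : Int) := by simp [h0]
      rw [dif_neg hnp]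
      simp [h0, Nat.digits_zero]

-- for positive n not divisible by 10, the reversal equals n iff the digit list is a palindrome
lemma pv_rev_eq_iff {n : Nat} (h : 0 < n) (hnd : ¬ (10 ∣ n)) :
    (Nat.ofDigits 10 (Nat.digits 10 n).reverse : Nat) = n ↔
      (Nat.digits 10 n).reverse = Nat.digits 10 n := by
  constructor
  · intro he
    have hlt : ∀ d ∈ (Nat.digits 10 n).reverse, d < 10 := by
      intro d hd
      exact Nat.digits_lt_base (by norm_num) (List.mem_reverse.mp hd)
    have hd : Nat.digits 10 n = n % 10 :: Nat.digits 10 (n / 10) := Nat.digits_def' (by norm_num) h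
    have hlast? : ((Nat.digits 10 n).reverse).getLast? = some (n % 10) := by
      rw [List.getLast?_reverse, hd]; rfl
    have hlast : ∀ (hne : (Nat.digits 10 n).reverse ≠ []),
        ((Nat.digits 10 n).reverse).getLast hne ≠ 0 := by
      intro hne
      have h1 := List.getLast?_eq_some_getLast hne
      rw [hlast?] at h1
      have h2 : (Nat.digits 10 n).reverse.getLast hne = n % 10 := (Option.some.injEq _ _ ▸ h1).symm
      rw [h2]
      omega
    have hdig := Nat.digits_ofDigits 10 (by norm_num) _ hlt hlast
    rw [he] at hdig
    exact hdig.symm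
  · intro he
    rw [he, Nat.ofDigits_digits]

-- B in terms of the digit list, for nonnegative input
lemma pv_alt_nonneg (n : Nat) :
    its_palindrome_alt (n : Int)
      = ((Nat.digits 10 n).reverse == Nat.digits 10 n) := by
  unfold its_palindrome_alt
  have htc : PySem.Int.toChars (n : Int) = Nat.toDigits 10 n := by
    simp [PySem.Int.toChars]
  by_cases h : 0 < n
  · rw [htc, pv_toDigits_eq h]
    simp only [List.reverse_reverse]
    have hlt : ∀ d ∈ Nat.digits 10 n, d < 10 := fun d hd => Nat.digits_lt_base (by norm_num) hd
    by_cases hp : (Nat.digits 10 n).reverse = Nat.digits 10 n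
    · simp [← List.map_reverse, hp]
    · have hne : ((Nat.digits 10 n).map Nat.digitChar).reverse ≠ (Nat.digits 10 n).map Nat.digitChar := by
        intro hc
        rw [← List.map_reverse] at hc
        exact hp (pv_map_digitChar_inj _ _ (by simpa using hlt) hlt hc)
      simp [hp, hne]
  · have h0 : n = 0 := by omega
    subst h0
    decide

-- ===== VERDICT (by name: the statement is the Claim_ definition above) =====
theorem its_palindrome_spec : Claim_equal_its_palindrome := by
  intro x _
  unfold Spec_its_palindrome its_palindrome
  by_cases hneg : x < 0
  · -- A returns False; B compares a '-'-prefixed string with its reverse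
    obtain ⟨m, rfl⟩ : ∃ m : Nat, x = -(m : Int) := ⟨x.natAbs, by omega⟩
    have hm : 0 < m := by omega
    rw [if_pos (by simp only [Bool.or_eq_true, decide_eq_true_eq]; exact Or.inl hneg)]
    unfold its_palindrome_alt
    have htc : PySem.Int.toChars (-(m : Int)) = '-' :: Nat.toDigits 10 m := by
      simp [PySem.Int.toChars]; omega
    rw [htc, pv_toDigits_eq hm]
    have hd : Nat.digits 10 m = m % 10 :: Nat.digits 10 (m / 10) := Nat.digits_def' (by norm_num) hm
    symm
    simp only [beq_eq_false_iff_ne, ne_eq]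
    intro hc
    have hh := congrArg List.head? hc
    have hgl : ('-' :: ((Nat.digits 10 m).map Nat.digitChar).reverse).getLast?
        = some (Nat.digitChar (m % 10)) := by
      rw [hd]
      simp only [List.map_cons, List.reverse_cons, ← List.cons_append, List.getLast?_concat]
    rw [List.head?_reverse, hgl] at hh
    simp only [List.head?_cons, Option.some.injEq] at hh
    exact pv_digitChar_ne_dash (by omega) hh.symm
  · obtain ⟨n, rfl⟩ : ∃ m : Nat, x = (m : Int) := ⟨x.toNat, by omega⟩
    rw [pv_alt_nonneg]
    by_cases h0 : n = 0
    · subst h0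
      rw [if_neg (by decide)]
      rw [pvRevLoop.eq_def]
      norm_num
    by_cases hdvd : 10 ∣ n
    · -- A returns False via the trailing-zero guard; B: first digit 0 ≠ last digit
      rw [if_pos (by
        simp only [pv_mod_cast, Bool.or_eq_true, decide_eq_true_eq, Bool.and_eq_true, beq_iff_eq,
          bne_iff_ne, ne_eq]
        right
        have hm0 : n % 10 = 0 := by omega
        refine ⟨by exact_mod_cast hm0, by exact_mod_cast h0⟩)]
      have hd : Nat.digits 10 n = n % 10 :: Nat.digits 10 (n / 10) :=
        Nat.digits_def' (by norm_num) (Nat.pos_of_ne_zero h0)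
      have hm0 : n % 10 = 0 := by omega
      symm
      simp only [beq_eq_false_iff_ne, ne_eq]
      intro hc
      have hne : Nat.digits 10 n ≠ [] := by simp [hd]
      have hh := congrArg List.head? hc
      rw [List.head?_reverse] at hh
      have h1 : (Nat.digits 10 n).getLast? = some 0 := by
        rw [hh, hd, List.head?_cons, hm0]
      have h2 := List.getLast?_eq_some_getLast hne
      rw [h1] at h2
      exact Nat.getLast_digit_ne_zero 10 h0 (Option.some_injective _ h2).symm
    · -- main case: the reversal loop equals x iff the digit list is a palindrome
      rw [if_neg (by
        simp only [pv_mod_cast, Bool.or_eq_true, decide_eq_true_eq, Bool.and_eq_true, beq_iff_eq,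
          bne_iff_ne, ne_eq, not_or, not_and]
        refine ⟨hneg, fun hmod => ?_⟩
        exfalso
        apply hdvd
        have : n % 10 = 0 := by exact_mod_cast hmod
        omega)]
      rw [pv_revLoop_eq n 0]
      simp only [zero_mul, zero_add]
      have hiff := pv_rev_eq_iff (Nat.pos_of_ne_zero h0) hdvd
      by_cases hp : (Nat.digits 10 n).reverse = Nat.digits 10 n
      · have : (Nat.ofDigits 10 (Nat.digits 10 n).reverse : Nat) = n := hiff.mpr hp
        simp [hp, Nat.ofDigits_digits]
      · have : (Nat.ofDigits 10 (Nat.digits 10 n).reverse : Nat) ≠ n := fun hc => hp (hiff.mp hc)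
        have hne : ((Nat.ofDigits 10 (Nat.digits 10 n).reverse : Nat) : Int) ≠ (n : Int) := by
          exact_mod_cast this
        simp [hp, hne]
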